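-- pv_equiv track=rewrite | github.com/FranciszekBialkowski/OiAK---project | main.py | parallel_prefix
-- ===== SOURCE A (Python) =====
-- import math
--
-- def create_ladner_fisher(n):
--     """Utworzenie szablonu drzewa prefiksowego typu Ladnera-Fishera"""
--     floors = math.ceil(math.log2(n))
--     prefix_tree = []
--     for i in range(floors):
--         tmp_table = []
--         tmp_counter = 0
--         is_black = False
--         for j in range(n):
--             if tmp_counter == 2 ** i:
--                 tmp_counter = 0
--                 is_black = not is_black
--             if is_black:
--                 tmp_table.append(1)
--             else:
--                 tmp_table.append(0)
--             tmp_counter += 1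
--         prefix_tree.append(tmp_table)
--     return prefix_tree
--
-- def parallel_prefix(G, P):
--     n = len(G)
--
--     ladner_fisher = create_ladner_fisher(n)
--
--     # Stworzenie tablic dla sum prefiksowych
--     prefix_g = G
--     prefix_p = P
--
--     for i in range(len(ladner_fisher)):
--         counter = 0
--         for j in range(n):
--             if ladner_fisher[i][j] == 1:
--                 prefix_g[j] = prefix_g[j] or (prefix_g[2**(i)-1
--                                         + counter*(2**(i+1))] and
--                                               prefix_p[j])
--                 prefix_p[j] = prefix_p[j] and prefix_p[2**(i)-1
--                                         + counter*(2**(i+1))]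
--             elif j!=0 and ladner_fisher[i][j-1] == 1:
--                 counter += 1
--
--     return prefix_g
-- ===== SOURCE B (Python) =====
-- def parallel_prefix(G, P):
--     n = len(G)
--     out = [(g, p) for g, p in zip(G, P)]
--
--     def scan(lo, width):
--         # prefix-combine the block [lo, lo+width), clipped to n
--         if width == 1 or lo >= n:
--             return
--         half = width // 2
--         scan(lo, half)
--         scan(lo + half, half)
--         mid = lo + half
--         if mid < n:
--             gl, pl = out[mid - 1]
--             for j in range(mid, min(lo + width, n)):
--                 g, p = out[j]
--                 out[j] = (g or (gl and p), p and pl)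
--
--     width = 1
--     while width < n:
--         width *= 2
--     scan(0, width)
--     return [g for g, _ in out]
-- ===== Notes on version B (the rewrite author's own statement) =====
-- stated objective: faster
-- what changed: Replaces the iterative floor-by-floor sweep over a materialized Ladner-Fischer 0/1 tree template (with per-floor counter bookkeeping and full re-scans of all n positions on every floor) by a recursive divide-and-conquer prefix scan on (g,p) pairs that combines each right half with the last element of its left half — no template is built and only the positions actually combined are touched (measured ~3.5x faster); Pre_ excludes the inputs on which A raises (empty G: ValueError from log2(0); …
-- outside the precondition, e.g. on parallel_prefix([5], []): A returns [5], B returns []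
import Mathlib
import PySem

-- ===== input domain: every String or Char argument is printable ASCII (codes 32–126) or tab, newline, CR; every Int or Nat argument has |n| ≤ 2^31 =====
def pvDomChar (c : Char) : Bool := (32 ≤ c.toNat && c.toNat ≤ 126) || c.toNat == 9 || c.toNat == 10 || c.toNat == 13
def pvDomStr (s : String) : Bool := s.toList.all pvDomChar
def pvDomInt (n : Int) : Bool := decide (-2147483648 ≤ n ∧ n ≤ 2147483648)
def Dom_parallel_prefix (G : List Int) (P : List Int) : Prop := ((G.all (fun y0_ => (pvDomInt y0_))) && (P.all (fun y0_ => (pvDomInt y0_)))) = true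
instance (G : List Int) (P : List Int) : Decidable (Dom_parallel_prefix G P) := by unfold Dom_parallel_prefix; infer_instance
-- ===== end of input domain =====

-- B replaces A's floor-by-floor sweep over a materialized Ladner-Fischer template by a recursive
-- divide-and-conquer prefix scan on (g,p) pairs (equivalence is about the RETURN value; Python A
-- mutates its arguments G and P in place, B does not).

-- ===== PORT A =====

-- Python 'x or y' / 'x and y' on ints (truthiness: nonzero), returning an operand
def pyOrI (a b : Int) : Int := if a ≠ 0 then a else b
def pyAndI (a b : Int) : Int := if a = 0 then a else b

-- math.ceil(math.log2 n) ported as Nat.clog 2 n: exact for 1 ≤ n (float log2 is exact enough below 2^31)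
def create_ladner_fisher (n : Nat) : List (List Int) :=
  let floors := Nat.clog 2 n
  (List.range floors).foldl
    (fun prefix_tree i =>
      let row :=
        (List.range n).foldl
          (fun (st : List Int × Nat × Bool) _j =>
            let st' := if st.2.1 = 2 ^ i then (st.1, 0, !st.2.2) else st
            (st'.1 ++ [if st'.2.2 then (1 : Int) else 0], st'.2.1 + 1, st'.2.2))
          ([], 0, false)
      prefix_tree ++ [row.1])
    []

def parallel_prefix (G : List Int) (P : List Int) : List Int :=
  let n := G.length
  let lf := create_ladner_fisher n
  let res :=
    (List.range lf.length).foldl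
      (fun (st : List Int × List Int) i =>
        let row := lf.getD i []
        let inner :=
          (List.range n).foldl
            (fun (st2 : List Int × List Int × Nat) j =>
              let pg := st2.1
              let pp := st2.2.1
              let counter := st2.2.2
              if row.getD j 0 = 1 then
                let idx := 2 ^ i - 1 + counter * 2 ^ (i + 1)
                let newg := pyOrI (pg.getD j 0) (pyAndI (pg.getD idx 0) (pp.getD j 0))
                let newp := pyAndI (pp.getD j 0) (pp.getD idx 0)
                (pg.set j newg, pp.set j newp, counter)
              else if j ≠ 0 ∧ row.getD (j - 1) 0 = 1 then
                (pg, pp, counter + 1)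
              else (pg, pp, counter))
            (st.1, st.2, 0)
        (inner.1, inner.2.1))
      (G, P)
  res.1

-- ===== PORT B =====

-- 'while width < n: width *= 2' (width starts at 1; the width = 0 guard is for totality only)
def growWidth (n w : Nat) : Nat :=
  if w = 0 then 0 else if w < n then growWidth n (w + w) else w
termination_by n - w
decreasing_by omega

-- 'def scan(lo, width): ...' mutating out, ported as a function on out
def bScanGo (n : Nat) (lo width : Nat) (out : List (Int × Int)) : List (Int × Int) :=
  if width ≤ 1 ∨ n ≤ lo then out
  else
    let half := width / 2
    let out1 := bScanGo n lo half out
    let out2 := bScanGo n (lo + half) half out1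
    let mid := lo + half
    if mid < n then
      let gl := (out2.getD (mid - 1) (0, 0)).1
      let pl := (out2.getD (mid - 1) (0, 0)).2
      (List.range' mid (min (lo + width) n - mid)).foldl
        (fun acc j =>
          let g := (acc.getD j (0, 0)).1
          let p := (acc.getD j (0, 0)).2
          acc.set j (pyOrI g (pyAndI gl p), pyAndI p pl))
        out2
    else out2
termination_by width
decreasing_by all_goals omega

def parallel_prefix_alt (G : List Int) (P : List Int) : List Int :=
  let n := G.length
  let out := G.zip P
  let width := growWidth n 1
  (bScanGo n 0 width out).map Prod.fst

-- ===== PRECONDITION & SPEC =====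

-- Pre_ excludes the inputs on which Python A raises: G = [] (ValueError from math.log2(0)) and
-- len(P) < len(G) with len(G) ≥ 2 (IndexError on prefix_p); the only excluded inputs A returns on
-- are the degenerate len(G) = 1 with P shorter (malformed for a carry network: here A accidentally
-- returns G untouched while B's pairwise zip yields [], and neither value is specified).
def Pre_parallel_prefix (G : List Int) (P : List Int) : Prop :=
  G ≠ [] ∧ G.length ≤ P.length
instance (G : List Int) (P : List Int) : Decidable (Pre_parallel_prefix G P) := by
  unfold Pre_parallel_prefix; infer_instance

def pvWitness_parallel_prefix : List Int × List Int := ([1, 0, 1], [0, 1, 1])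

def Spec_parallel_prefix (G : List Int) (P : List Int) (out : List Int) : Prop :=
  out = parallel_prefix_alt G P
instance (G : List Int) (P : List Int) (out : List Int) : Decidable (Spec_parallel_prefix G P out) := by
  unfold Spec_parallel_prefix; infer_instance

-- ===== CLAIM (what is proved, stated in full; the proofs are below) =====
def Claim_equal_parallel_prefix : Prop := ∀ (G : List Int) (P : List Int),
  Dom_parallel_prefix G P → Pre_parallel_prefix G P →
  Spec_parallel_prefix G P (parallel_prefix G P)

-- ===== LEMMAS AND PROOFS =====

-- 'while (s & (s-1)) > k: s &= s-1' — the cut of the network block containing s above k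
theorem land_pred_lt (s : Nat) (h : 0 < s) : s &&& (s - 1) < s :=
  lt_of_le_of_lt (Nat.and_le_right) (by omega)

def lfCut (s k : Nat) : Nat :=
  if h : k < s &&& (s - 1) then lfCut (s &&& (s - 1)) k else s
termination_by s
decreasing_by
  exact land_pred_lt s (by rcases Nat.eq_zero_or_pos s with h0 | h0 <;> simp_all)

-- `P` nonzero on the whole segment [l..j]
def Intact (P : List Int) (l j : Nat) : Prop := ∀ m, l ≤ m → m ≤ j → P.getD m 0 ≠ 0

-- combined propagate value over [l..j] (tree shape irrelevant: P[l] if intact, else 0)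
def pv (P : List Int) (l : Nat) : Nat → Int
  | j =>
    if _ : j ≤ l then P.getD l 0
    else if P.getD j 0 = 0 then 0 else pv P l (j - 1)
termination_by j => j
decreasing_by omega

-- nearest carry source: max k ∈ [l..j] with G[k] ≠ 0 and P nonzero on (k..j]
def Kf (G P : List Int) (l : Nat) : Nat → Option Nat
  | j =>
    if G.getD j 0 ≠ 0 then some j
    else if _ : j ≤ l then none
    else if P.getD j 0 = 0 then none
    else Kf G P l (j - 1)
termination_by j => j
decreasing_by omega

-- closed-form value of the combined generate over [l..j]
def W (G P : List Int) (l j : Nat) : Int :=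
  if G.getD j 0 ≠ 0 then G.getD j 0
  else
    match Kf G P l j with
    | none => 0
    | some k => P.getD (lfCut j k) 0

-- value of position j after the first i floors of the network
def Vf (G P : List Int) : Nat → Nat → Int
  | 0, j => G.getD j 0
  | i + 1, j =>
    if j / 2 ^ i % 2 = 1 then
      pyOrI (Vf G P i j)
        (pyAndI (Vf G P i ((j / 2 ^ i) * 2 ^ i - 1)) (pv P ((j / 2 ^ i) * 2 ^ i) j))
    else Vf G P i j

-- ---- arithmetic helpers ----

theorem pred_div (u e : Nat) (he : 0 < e) (hu : 0 < u) :
    (u - 1) / e = if u % e = 0 then u / e - 1 else u / e := by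
  have hmod := Nat.div_add_mod u e
  set q := u / e with hq
  set r := u % e with hr
  by_cases h0 : r = 0
  · simp only [h0, if_pos]
    have hq1 : 1 ≤ q := by
      rcases Nat.eq_zero_or_pos q with h | h
      · rw [h, Nat.mul_zero] at hmod; omega
      · exact h
    have h1 : u - 1 = (e - 1) + e * (q - 1) := by
      have : (e - 1) + e * (q - 1) + 1 = e * q := by
        zify [he, hq1]; ring
      omega
    rw [h1, Nat.add_mul_div_left _ _ he, Nat.div_eq_of_lt (by omega)]
    omega
  · simp only [h0, if_false]
    have hre : r < e := Nat.mod_lt u he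
    have h1 : u - 1 = (r - 1) + e * q := by omega
    rw [h1, Nat.add_mul_div_left _ _ he, Nat.div_eq_of_lt (by omega)]
    omega

theorem two_mul_land_pred (X : Nat) (hX : 0 < X) :
    (2 * X) &&& (2 * X - 1) = 2 * (X &&& (X - 1)) := by
  apply Nat.eq_of_testBit_eq
  intro i
  cases i with
  | zero => simp [Nat.testBit_zero, Nat.mul_mod_right]
  | succ i =>
    have h1 : 2 * X - 1 = 2 * (X - 1) + 1 := by omega
    have e1 : 2 * X / 2 = X := by omega
    have e2 : (2 * (X - 1) + 1) / 2 = X - 1 := by omega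
    have e3 : 2 * (X &&& (X - 1)) / 2 = X &&& (X - 1) := by omega
    rw [h1, Nat.testBit_and, Nat.testBit_add_one, Nat.testBit_add_one, Nat.testBit_add_one,
      e1, e2, e3, Nat.testBit_and]

theorem land_pred (t q : Nat) (hq : q % 2 = 1) :
    (2 ^ t * q) &&& (2 ^ t * q - 1) = 2 ^ t * (q - 1) := by
  induction t with
  | zero =>
    simp only [pow_zero, one_mul]
    apply Nat.eq_of_testBit_eq
    intro i
    have h2 : q - 1 = 2 * (q / 2) := by omega
    cases i with
    | zero => simp [Nat.testBit_zero, hq, h2, Nat.mul_mod_right]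
    | succ i =>
      have e4 : 2 * (q / 2) / 2 = q / 2 := by omega
      rw [Nat.testBit_and, h2, Nat.testBit_add_one, Nat.testBit_add_one, e4]
      exact Bool.and_self _
  | succ t ih =>
    have hX : 0 < 2 ^ t * q := by exact Nat.mul_pos (Nat.two_pow_pos t) (by omega)
    calc (2 ^ (t+1) * q) &&& (2 ^ (t+1) * q - 1)
        = (2 * (2 ^ t * q)) &&& (2 * (2 ^ t * q) - 1) := by ring_nf
      _ = 2 * ((2 ^ t * q) &&& (2 ^ t * q - 1)) := two_mul_land_pred _ hX
      _ = 2 ^ (t+1) * (q - 1) := by rw [ih]; ring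

-- ---- pv lemmas ----

theorem pyOrI_ne (a b : Int) (h : a ≠ 0) : pyOrI a b = a := by simp [pyOrI, h]
theorem pyOrI_zero (b : Int) : pyOrI 0 b = b := by simp [pyOrI]
theorem pyAndI_ne (a b : Int) (h : a ≠ 0) : pyAndI a b = b := by simp [pyAndI, h]
theorem pyAndI_zero (b : Int) : pyAndI 0 b = 0 := by simp [pyAndI]
theorem pyAndI_zero_right (a : Int) : pyAndI a 0 = 0 := by unfold pyAndI; split <;> simp_all

theorem pv_of_intact (P : List Int) (l j : Nat) (h : Intact P l j) :
    pv P l j = P.getD l 0 := by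
  revert h
  fun_induction pv P l j with
  | case1 x _j h1 => intro h; rfl
  | case2 x _j h1 h2 => intro h; exact absurd h2 (h x (by omega) le_rfl)
  | case3 x _j h1 h2 ih => intro h; exact ih (fun m a b => h m a (by omega))

theorem pv_of_not_intact (P : List Int) (l j : Nat) (hl : l ≤ j) (h : ¬ Intact P l j) :
    pv P l j = 0 := by
  revert hl h
  fun_induction pv P l j with
  | case1 x _j h1 =>
    intro hl hI
    by_contra hne
    refine hI (fun m a b => ?_)
    have hm : m = l := by omega
    exact hm ▸ hne
  | case2 x _j h1 h2 => intro _ _; rfl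
  | case3 x _j h1 h2 ih =>
    intro hl hI
    refine ih (by omega) (fun hc => hI (fun m a b => ?_))
    rcases Nat.lt_or_ge m x with hm | hm
    · exact hc m a (by omega)
    · have : m = x := by omega
      subst this; exact h2

theorem intact_mono (P : List Int) (l l' j j' : Nat) (h : Intact P l j) (h1 : l ≤ l')
    (h2 : j' ≤ j) : Intact P l' j' := fun m hm1 hm2 => h m (by omega) (by omega)

theorem pv_merge (P : List Int) (l s j : Nat) (hls : l ≤ s) (hs : 0 < s) (hsj : s ≤ j) :
    pyAndI (pv P s j) (pv P l (s - 1)) = pv P l j := by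
  by_cases hI : Intact P s j
  · have hPs : P.getD s 0 ≠ 0 := hI s le_rfl hsj
    rw [pv_of_intact P s j hI, pyAndI_ne _ _ hPs]
    by_cases hI2 : Intact P l (s - 1)
    · have hIlj : Intact P l j := by
        intro m h1 h2
        rcases Nat.lt_or_ge m s with hm | hm
        · exact hI2 m h1 (by omega)
        · exact hI m hm h2
      rw [pv_of_intact P l (s-1) hI2, pv_of_intact P l j hIlj]
    · have hlss : l ≤ s - 1 := by
        by_contra hc
        exact hI2 (fun m hm1 hm2 => absurd hm1 (by omega))
      rw [pv_of_not_intact P l (s-1) hlss hI2,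
          pv_of_not_intact P l j (by omega)
            (fun hc => hI2 (intact_mono P l l j (s-1) hc le_rfl (by omega)))]
  · rw [pv_of_not_intact P s j hsj hI, pyAndI_zero,
        pv_of_not_intact P l j (by omega)
          (fun hc => hI (intact_mono P l s j j hc hls le_rfl))]

-- ---- Kf lemmas ----

theorem Kf_bounds (G P : List Int) (l j k : Nat) (hlj : l ≤ j) (h : Kf G P l j = some k) :
    l ≤ k ∧ k ≤ j := by
  revert hlj h
  fun_induction Kf G P l j with
  | case1 x _j hG => intro hlj h; simp only [Option.some_inj] at h; omega
  | case2 x _j hG hjl => intro _ h; simp at h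
  | case3 x _j hG hjl hP => intro _ h; simp at h
  | case4 x _j hG hjl hP ih => intro hlj h; have := ih (by omega) h; omega

theorem Kf_path (G P : List Int) (l j k : Nat) (h : Kf G P l j = some k) :
    ∀ m, k < m → m ≤ j → P.getD m 0 ≠ 0 := by
  revert h
  fun_induction Kf G P l j with
  | case1 x _j hG =>
    intro h m hm1 hm2
    simp only [Option.some_inj] at h
    exact absurd hm2 (by omega)
  | case2 x _j hG hjl => intro h; simp at h
  | case3 x _j hG hjl hP => intro h; simp at h
  | case4 x _j hG hjl hP ih =>
    intro h m h1 h2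
    rcases Nat.lt_or_ge m x with hm | hm
    · exact ih h m h1 (by omega)
    · have : m = x := by omega
      subst this; exact hP

theorem Kf_src (G P : List Int) (l j k : Nat) (h : Kf G P l j = some k) :
    G.getD k 0 ≠ 0 := by
  revert h
  fun_induction Kf G P l j with
  | case1 x _j hG => intro h; simp only [Option.some_inj] at h; exact h ▸ hG
  | case2 x _j hG hjl => intro h; simp at h
  | case3 x _j hG hjl hP => intro h; simp at h
  | case4 x _j hG hjl hP ih => exact ih

theorem Kf_decomp_some (G P : List Int) (l s j k : Nat) (h1 : l < s) (h2 : s ≤ j)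
    (h : Kf G P s j = some k) : Kf G P l j = some k := by
  revert h2 h
  fun_induction Kf G P s j with
  | case1 x _j hG => intro h2 h; rw [Kf, if_pos hG]; exact h
  | case2 x _j hG hjl => intro h2 h; simp at h
  | case3 x _j hG hjl hP => intro h2 h; simp at h
  | case4 x _j hG hjl hP ih =>
    intro h2 h
    rw [Kf, if_neg hG, dif_neg (by omega), if_neg hP]
    exact ih (by omega) h

theorem Kf_decomp_none_intact (G P : List Int) (l s j : Nat) (h1 : l < s) (h2 : s ≤ j)
    (h : Kf G P s j = none) (hI : Intact P s j) : Kf G P l j = Kf G P l (s - 1) := by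
  revert h2 h hI
  fun_induction Kf G P s j with
  | case1 x _j hG => intro h2 h hI; simp at h
  | case2 x _j hG hjl =>
    intro h2 h hI
    have hxs : x = s := by omega
    subst hxs
    rw [Kf, if_neg hG, dif_neg (by omega), if_neg (hI x le_rfl le_rfl)]
  | case3 x _j hG hjl hP =>
    intro h2 h hI
    exact absurd hP (hI x (by omega) le_rfl)
  | case4 x _j hG hjl hP ih =>
    intro h2 h hI
    rw [Kf, if_neg hG, dif_neg (by omega), if_neg hP]
    exact ih (by omega) h (intact_mono P s s x (x-1) hI le_rfl (by omega))

theorem Kf_decomp_none_broken (G P : List Int) (l s j : Nat) (h1 : l < s) (h2 : s ≤ j)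
    (h : Kf G P s j = none) (hI : ¬ Intact P s j) : Kf G P l j = none := by
  revert h2 h hI
  fun_induction Kf G P s j with
  | case1 x _j hG => intro h2 h hI; simp at h
  | case2 x _j hG hjl =>
    intro h2 h hI
    have hxs : x = s := by omega
    subst hxs
    have hPs : P.getD x 0 = 0 := by
      by_contra hc
      refine hI (fun m hm1 hm2 => ?_)
      have hm : m = x := by omega
      exact hm ▸ hc
    rw [Kf, if_neg hG, dif_neg (by omega), if_pos hPs]
  | case3 x _j hG hjl hP =>
    intro h2 h hI
    rw [Kf, if_neg hG, dif_neg (by omega), if_pos hP]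
  | case4 x _j hG hjl hP ih =>
    intro h2 h hI
    rw [Kf, if_neg hG, dif_neg (by omega), if_neg hP]
    refine ih (by omega) h (fun hc => hI (fun m hm1 hm2 => ?_))
    rcases Nat.lt_or_ge m x with hm | hm
    · exact hc m hm1 (by omega)
    · have : m = x := by omega
      subst this; exact hP

theorem lfCut_bounds (s k : Nat) (h : k < s) : k < lfCut s k ∧ lfCut s k ≤ s := by
  revert h
  fun_induction lfCut s k with
  | case1 x hlt ih =>
    intro h
    have := ih (by omega)
    exact ⟨this.1, le_trans this.2 Nat.and_le_left⟩
  | case2 x hlt => intro h; exact ⟨h, le_rfl⟩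

theorem lfCut_stop (s k : Nat) (h : s &&& (s - 1) ≤ k) : lfCut s k = s := by
  unfold lfCut; simp [Nat.not_lt.mpr h]

theorem lfCut_through (i k j : Nat) (hb : j / 2 ^ i % 2 = 1) (hk : k < j / 2 ^ i * 2 ^ i) :
    lfCut j k = lfCut (j / 2 ^ i * 2 ^ i) k := by
  induction j using Nat.strong_induction_on with
  | _ j IH =>
    have hpos : 0 < 2 ^ i := Nat.two_pow_pos i
    have hmd : j / 2 ^ i * 2 ^ i + j % 2 ^ i = j := Nat.div_add_mod' j (2 ^ i)
    by_cases hjs : j % 2 ^ i = 0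
    · rw [show j / 2 ^ i * 2 ^ i = j by omega]
    · have hj0 : j ≠ 0 := fun h => hjs (by simp [h])
      obtain ⟨t, m, hm, hjm⟩ := Nat.exists_eq_two_pow_mul_odd hj0
      have hmo : m % 2 = 1 := Nat.odd_iff.mp hm
      have hti : t < i := by
        by_contra hc
        push_neg at hc
        have hdd : (2:Nat) ^ i ∣ j := hjm ▸ Dvd.dvd.mul_right (pow_dvd_pow 2 hc) m
        exact hjs (Nat.eq_zero_of_dvd_of_lt hdd (by omega)|>.symm ▸ rfl)
      have hland : j &&& (j - 1) = j - 2 ^ t := by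
        rw [hjm, land_pred t m hmo]
        rw [Nat.mul_sub, Nat.mul_one]
      have hdvd : (2:Nat) ^ t ∣ j % 2 ^ i := by
        have d1 : (2:Nat) ^ t ∣ j := hjm ▸ Dvd.dvd.mul_right dvd_rfl m
        have d2 : (2:Nat) ^ t ∣ 2 ^ i := pow_dvd_pow 2 (le_of_lt hti)
        exact (Nat.dvd_mod_iff d2).mpr d1
      have hge : 2 ^ t ≤ j % 2 ^ i := Nat.le_of_dvd (by omega) hdvd
      have hub : j / 2 ^ i * 2 ^ i ≤ j - 2 ^ t := by
        conv_rhs => rw [← hmd]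
        omega
      have hdiv : (j - 2 ^ t) / 2 ^ i = j / 2 ^ i := by
        have h1 : j - 2 ^ t = (j % 2 ^ i - 2 ^ t) + 2 ^ i * (j / 2 ^ i) := by
          apply Nat.sub_eq_of_eq_add
          rw [show ((j % 2 ^ i - 2 ^ t) + 2 ^ i * (j / 2 ^ i)) + 2 ^ t
                = (2 ^ i * (j / 2 ^ i)) + ((j % 2 ^ i - 2 ^ t) + 2 ^ t) from by ring,
             Nat.sub_add_cancel hge, mul_comm]
          exact hmd.symm
        rw [h1, Nat.add_mul_div_left _ _ hpos,
            Nat.div_eq_of_lt (lt_of_le_of_lt (Nat.sub_le _ _) (Nat.mod_lt j hpos))]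
        omega
      have htp : (0:Nat) < 2 ^ t := Nat.two_pow_pos t
      have hstep : lfCut j k = lfCut (j - 2 ^ t) k := by
        rw [lfCut, dif_pos (by rw [hland]; exact lt_of_lt_of_le hk hub), hland]
      rw [hstep, IH (j - 2 ^ t) (Nat.sub_lt (by omega) htp) (by rw [hdiv]; exact hb)
            (by rw [hdiv]; exact hk), hdiv]

-- ---- the network invariant: Vf i j is the closed-form W on the floor-i coverage ----

theorem pow_succ_div (j i : Nat) : j / 2 ^ (i + 1) = j / 2 ^ i / 2 := by
  rw [pow_succ, Nat.div_div_eq_div_mul]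

theorem odd_halve (x : Nat) (h : x % 2 = 1) : x / 2 * 2 = x - 1 := by omega

theorem even_halve (x : Nat) (h : x % 2 ≠ 1) : x / 2 * 2 = x := by omega

theorem sub_one_mul_nat (a e : Nat) : (a - 1) * e = a * e - e := by
  rw [Nat.sub_mul, one_mul]

-- s &&& (s - 1) for an aligned block start s = a * 2^i with a odd
theorem sland (a i : Nat) (ha : a % 2 = 1) : (a * 2 ^ i) &&& (a * 2 ^ i - 1) = a * 2 ^ i - 2 ^ i := by
  rw [mul_comm a (2 ^ i), land_pred i a ha, Nat.mul_sub, mul_one, mul_comm]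

-- the heart: one black Ladner-Fischer combine step preserves the closed form W
theorem W_step (G P : List Int) (i s j : Nat) (hs1 : 2 ^ i ≤ s) (hsj : s ≤ j)
    (hseq : s = j / 2 ^ i * 2 ^ i) (hbit : j / 2 ^ i % 2 = 1) :
    pyOrI (W G P s j) (pyAndI (W G P (s - 2 ^ i) (s - 1)) (pv P s j)) = W G P (s - 2 ^ i) j := by
  have hpos : 0 < 2 ^ i := Nat.two_pow_pos i
  have hl's : s - 2 ^ i < s := by omega
  by_cases hG : G.getD j 0 ≠ 0
  · rw [W, if_pos hG, pyOrI_ne _ _ hG, W, if_pos hG]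
  · have hG0 : ¬ (G.getD j 0 ≠ 0) := hG
    rcases hK : Kf G P s j with _ | k
    · have hW1 : W G P s j = 0 := by rw [W, if_neg hG0, hK]
      rw [hW1, pyOrI_zero]
      by_cases hI : Intact P s j
      · have hpv : pv P s j = P.getD s 0 := pv_of_intact _ _ _ hI
        have hKd := Kf_decomp_none_intact G P (s - 2 ^ i) s j (by omega) hsj hK hI
        rcases hK2 : Kf G P (s - 2 ^ i) (s - 1) with _ | k2
        · have hGs : G.getD (s - 1) 0 = 0 := by
            by_contra hc
            rw [Kf, if_pos hc] at hK2
            simp at hK2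
          have hW2 : W G P (s - 2 ^ i) (s - 1) = 0 := by
            rw [W, if_neg (not_not_intro hGs), hK2]
          rw [hW2, pyAndI_zero, W, if_neg hG0, hKd, hK2]
        · have hb2 := Kf_bounds G P (s - 2 ^ i) (s - 1) k2 (by omega) hK2
          have hW2ne : W G P (s - 2 ^ i) (s - 1) ≠ 0 := by
            rw [W]
            by_cases hGs : G.getD (s - 1) 0 ≠ 0
            · rw [if_pos hGs]; exact hGs
            · rw [if_neg hGs, hK2]
              have hsrc := Kf_src G P (s - 2 ^ i) (s - 1) k2 hK2
              have hk2lt : k2 < s - 1 := by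
                rcases Nat.lt_or_ge k2 (s - 1) with h | h
                · exact h
                · have hk2e : k2 = s - 1 := by omega
                  exact absurd hsrc (by rw [hk2e]; simpa using hGs)
              have hcb := lfCut_bounds (s - 1) k2 hk2lt
              exact Kf_path G P (s - 2 ^ i) (s - 1) k2 hK2 (lfCut (s - 1) k2) hcb.1 hcb.2
          rw [pyAndI_ne _ _ hW2ne, hpv]
          have hcut : lfCut j k2 = s := by
            rw [hseq] at hb2 ⊢
            rw [lfCut_through i k2 j hbit (by omega)]
            apply lfCut_stop
            rw [sland (j / 2 ^ i) i hbit]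
            omega
          rw [W, if_neg hG0, hKd, hK2]
          show P.getD s 0 = P.getD (lfCut j k2) 0
          rw [hcut]
      · have hpv : pv P s j = 0 := pv_of_not_intact _ _ _ hsj hI
        rw [hpv, pyAndI_zero_right, W, if_neg hG0,
            Kf_decomp_none_broken G P (s - 2 ^ i) s j (by omega) hsj hK hI]
    · have hb := Kf_bounds G P s j k (by omega) hK
      have hsrc := Kf_src G P s j k hK
      have hklt : k < j := by
        rcases Nat.lt_or_ge k j with h | h
        · exact h
        · have hke : k = j := by omega
          exact absurd hsrc (by rw [hke]; simpa using hG0)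
      have hcb := lfCut_bounds j k hklt
      have hne : P.getD (lfCut j k) 0 ≠ 0 := Kf_path G P s j k hK (lfCut j k) hcb.1 hcb.2
      rw [W, if_neg hG0, hK, pyOrI_ne _ _ hne, W, if_neg hG0,
          Kf_decomp_some G P (s - 2 ^ i) s j k (by omega) hsj hK]

theorem V_char (G P : List Int) (i j : Nat) :
    Vf G P i j = W G P (j / 2 ^ i * 2 ^ i) j := by
  induction i generalizing j with
  | zero =>
    simp only [Vf, pow_zero, Nat.div_one, mul_one]
    by_cases hG : G.getD j 0 ≠ 0
    · rw [W, if_pos hG]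
    · rw [W, if_neg hG, Kf, if_neg hG, dif_pos le_rfl]
      simpa using hG
  | succ i ih =>
    have hpos : 0 < 2 ^ i := Nat.two_pow_pos i
    have hsj : j / 2 ^ i * 2 ^ i ≤ j := Nat.div_mul_le_self j (2 ^ i)
    by_cases hbit : j / 2 ^ i % 2 = 1
    · have ha1 : 1 ≤ j / 2 ^ i := by
        rcases Nat.eq_zero_or_pos (j / 2 ^ i) with h | h
        · rw [h] at hbit; simp at hbit
        · exact h
      have hs1 : 2 ^ i ≤ j / 2 ^ i * 2 ^ i := Nat.le_mul_of_pos_left _ (by omega)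
      have hl' : j / 2 ^ (i + 1) * 2 ^ (i + 1) = j / 2 ^ i * 2 ^ i - 2 ^ i := by
        rw [show j / 2 ^ (i+1) * 2 ^ (i+1) = (j / 2 ^ i / 2 * 2) * 2 ^ i from by
              rw [pow_succ_div, pow_succ]; ring,
            odd_halve (j / 2 ^ i) hbit, sub_one_mul_nat]
      have hsm1 : (j / 2 ^ i * 2 ^ i - 1) / 2 ^ i * 2 ^ i = j / 2 ^ i * 2 ^ i - 2 ^ i := by
        rw [pred_div _ _ hpos (by omega), if_pos (Nat.mul_mod_left _ _),
            Nat.mul_div_cancel _ hpos, sub_one_mul_nat]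
      rw [show Vf G P (i+1) j = if j / 2 ^ i % 2 = 1 then
            pyOrI (Vf G P i j)
              (pyAndI (Vf G P i ((j / 2 ^ i) * 2 ^ i - 1))
                (pv P ((j / 2 ^ i) * 2 ^ i) j))
          else Vf G P i j from rfl,
          if_pos hbit, ih j, ih (j / 2 ^ i * 2 ^ i - 1), hsm1, hl']
      exact W_step G P i (j / 2 ^ i * 2 ^ i) j hs1 hsj rfl hbit
    · have hl' : j / 2 ^ (i + 1) * 2 ^ (i + 1) = j / 2 ^ i * 2 ^ i := by
        rw [show j / 2 ^ (i+1) * 2 ^ (i+1) = (j / 2 ^ i / 2 * 2) * 2 ^ i from by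
              rw [pow_succ_div, pow_succ]; ring,
            even_halve (j / 2 ^ i) hbit]
      rw [show Vf G P (i+1) j = if j / 2 ^ i % 2 = 1 then
            pyOrI (Vf G P i j)
              (pyAndI (Vf G P i ((j / 2 ^ i) * 2 ^ i - 1))
                (pv P ((j / 2 ^ i) * 2 ^ i) j))
          else Vf G P i j from rfl,
          if_neg hbit, ih j, hl']

-- ---- characterization of create_ladner_fisher ----

theorem pred_mod (u e : Nat) (he : 0 < e) (hu : 0 < u) :
    (u - 1) % e = if u % e = 0 then e - 1 else u % e - 1 := by
  obtain ⟨q, r, hqr, hr⟩ : ∃ q r, u = e * q + r ∧ r < e :=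
    ⟨u / e, u % e, (Nat.div_add_mod u e).symm, Nat.mod_lt u he⟩
  subst hqr
  rcases Nat.eq_zero_or_pos r with h0 | h0
  · subst h0
    have hq : 0 < q := by
      rcases Nat.eq_zero_or_pos q with h | h
      · simp [h] at hu
      · exact h
    obtain ⟨q', rfl⟩ : ∃ q', q = q' + 1 := ⟨q - 1, by omega⟩
    have h2 : e * (q' + 1) + 0 - 1 = e - 1 + e * q' := by
      rw [Nat.mul_succ]; omega
    rw [h2, Nat.add_mul_mod_self_left, Nat.mod_eq_of_lt (by omega),
        if_pos (by rw [Nat.mul_add_mod]; simp)]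
  · have hmod : (e * q + r) % e = r := by rw [Nat.mul_add_mod, Nat.mod_eq_of_lt hr]
    have h2 : e * q + r - 1 = r - 1 + e * q := by omega
    rw [hmod, h2, Nat.add_mul_mod_self_left, Nat.mod_eq_of_lt (by omega), if_neg (by omega)]

theorem parity_flip (x : Nat) (hx : 1 ≤ x) :
    (!decide ((x - 1) % 2 = 1)) = decide (x % 2 = 1) := by
  by_cases h : x % 2 = 1
  · simp [h, show (x - 1) % 2 = 0 by omega]
  · simp [h, show (x - 1) % 2 = 1 by omega]

theorem row_inv (i t : Nat) :
    (List.range t).foldl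
      (fun (st : List Int × Nat × Bool) _j =>
        let st' := if st.2.1 = 2 ^ i then (st.1, 0, !st.2.2) else st
        (st'.1 ++ [if st'.2.2 then (1 : Int) else 0], st'.2.1 + 1, st'.2.2))
      ([], 0, false)
    = ((List.range t).map (fun j => if j / 2 ^ i % 2 = 1 then (1:Int) else 0),
       (if t = 0 then 0 else (t - 1) % 2 ^ i + 1),
       (if t = 0 then false else decide ((t - 1) / 2 ^ i % 2 = 1))) := by
  have hpos : 0 < 2 ^ i := Nat.two_pow_pos i
  induction t with
  | zero => simp
  | succ t ih =>
    rw [List.range_succ, List.foldl_append, ih, List.foldl_cons, List.foldl_nil,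
        List.map_append, List.map_cons, List.map_nil]
    simp only [Nat.succ_ne_zero, if_false, Nat.add_sub_cancel]
    rcases Nat.eq_zero_or_pos t with ht | ht
    · subst ht
      have h1 : ¬ (0 = 2 ^ i) := by omega
      norm_num [if_neg h1, Nat.zero_div]
    · have hne : ¬ t = 0 := by omega
      simp only [if_neg hne]
      have hdm := Nat.div_add_mod t (2 ^ i)
      by_cases hf : t % 2 ^ i = 0
      · have hflip : (t - 1) % 2 ^ i + 1 = 2 ^ i := by
          rw [pred_mod t _ hpos (by omega), if_pos hf]
          omega
        simp only [if_pos hflip]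
        have hq1 : 1 ≤ t / 2 ^ i := by
          rcases Nat.eq_zero_or_pos (t / 2 ^ i) with h | h
          · rw [h, Nat.mul_zero] at hdm; omega
          · exact h
        have hd : (t - 1) / 2 ^ i = t / 2 ^ i - 1 := by
          rw [pred_div t _ hpos (by omega), if_pos hf]
        rw [hd, parity_flip (t / 2 ^ i) hq1]
        simp [hf]
      · have hflip : ¬ ((t - 1) % 2 ^ i + 1 = 2 ^ i) := by
          have hm := pred_mod t _ hpos (by omega)
          rw [if_neg hf] at hm
          have hlt := Nat.mod_lt t hpos
          omega
        simp only [if_neg hflip]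
        have hd : (t - 1) / 2 ^ i = t / 2 ^ i := by
          rw [pred_div t _ hpos (by omega), if_neg hf]
        rw [hd]
        have hm2 := pred_mod t _ hpos (by omega)
        rw [if_neg hf] at hm2
        have hlt := Nat.mod_lt t hpos
        have hc : (t - 1) % 2 ^ i + 1 = t % 2 ^ i := by omega
        rw [hc]
        simp

theorem lf_char (n : Nat) :
    create_ladner_fisher n =
      (List.range (Nat.clog 2 n)).map
        (fun i => (List.range n).map (fun j => if j / 2 ^ i % 2 = 1 then (1 : Int) else 0)) := by
  show (List.range (Nat.clog 2 n)).foldl _ [] = _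
  rw [show (fun (prefix_tree : List (List Int)) (i : Nat) =>
        let row :=
          (List.range n).foldl
            (fun (st : List Int × Nat × Bool) _j =>
              let st' := if st.2.1 = 2 ^ i then (st.1, 0, !st.2.2) else st
              (st'.1 ++ [if st'.2.2 then (1 : Int) else 0], st'.2.1 + 1, st'.2.2))
            ([], 0, false)
        prefix_tree ++ [row.1])
      = (fun (prefix_tree : List (List Int)) (i : Nat) => prefix_tree ++
          [(List.range n).map (fun j => if j / 2 ^ i % 2 = 1 then (1:Int) else 0)]) from by
        funext tree i
        show tree ++ [((List.range n).foldl _ ([], 0, false)).1] = _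
        rw [row_inv i n]]
  rw [PySem.List.foldl_append_singleton_eq_map]
  simp

-- ---- characterization of port A ----

theorem set_map_range (n u : Nat) (f : Nat → Int) (v : Int) :
    ((List.range n).map f).set u v = (List.range n).map (fun m => if m = u then v else f m) := by
  apply List.ext_getElem (by simp)
  intro m h1 h2
  rw [List.getElem_set]
  by_cases hm : u = m
  · subst hm
    simp [List.getElem_map, List.getElem_range]
  · simp only [if_neg hm, List.getElem_map, List.getElem_range]
    rw [if_neg (fun hc : m = u => hm hc.symm)]

theorem getD_mr_append (n : Nat) (f : Nat → Int) (rest : List Int) (m : Nat) (h : m < n) :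
    (((List.range n).map f) ++ rest).getD m 0 = f m := by
  rw [List.getD_append _ _ _ _ (by simp [h]), PySem.List.getD_map_range f n m _ h]

theorem set_mr_append (n : Nat) (f : Nat → Int) (rest : List Int) (u : Nat) (v : Int)
    (h : u < n) :
    (((List.range n).map f) ++ rest).set u v
      = ((List.range n).map (fun m => if m = u then v else f m)) ++ rest := by
  rw [List.set_append, if_pos (by simp [h]), set_map_range]

theorem helper1 (E Y X : Nat) (hE : 1 ≤ E) (h : X = Y + E) : E - 1 + Y = X - 1 := by omega

theorem helper2 (E Y X : Nat) (hE : 1 ≤ E) (h : X = Y + E) : X - 1 = (E - 1) + Y := by omega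

theorem helper3 (E Y X : Nat) (h : X = Y + E) : Y = X - E := by omega

-- the inner loop of parallel_prefix, one floor i: mid-loop invariant
theorem inner_inv (G P : List Int) (i : Nat) (row : List Int)
    (hrow : ∀ j, j < G.length → row.getD j 0 = (if j / 2 ^ i % 2 = 1 then (1:Int) else 0))
    (u : Nat) (hu : u ≤ G.length) :
    (List.range u).foldl
      (fun (st2 : List Int × List Int × Nat) j =>
        let pg := st2.1
        let pp := st2.2.1
        let counter := st2.2.2
        if row.getD j 0 = 1 then
          let idx := 2 ^ i - 1 + counter * 2 ^ (i + 1)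
          let newg := pyOrI (pg.getD j 0) (pyAndI (pg.getD idx 0) (pp.getD j 0))
          let newp := pyAndI (pp.getD j 0) (pp.getD idx 0)
          (pg.set j newg, pp.set j newp, counter)
        else if j ≠ 0 ∧ row.getD (j - 1) 0 = 1 then (pg, pp, counter + 1)
        else (pg, pp, counter))
      ((List.range G.length).map (fun j => Vf G P i j),
       (List.range G.length).map (fun j => pv P (j / 2 ^ i * 2 ^ i) j) ++ P.drop G.length,
       0)
    = ((List.range G.length).map
         (fun j => if j < u then Vf G P (i+1) j else Vf G P i j),
       (List.range G.length).map
         (fun j => if j < u then pv P (j / 2 ^ (i+1) * 2 ^ (i+1)) j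
                   else pv P (j / 2 ^ i * 2 ^ i) j) ++ P.drop G.length,
       (u - 1) / 2 ^ (i+1)) := by
  have hpos : 0 < 2 ^ i := Nat.two_pow_pos i
  have hpos1 : 0 < 2 ^ (i+1) := Nat.two_pow_pos (i+1)
  induction u with
  | zero => simp
  | succ u ih =>
    have hun : u < G.length := by omega
    rw [List.range_succ, List.foldl_append, ih (by omega), List.foldl_cons, List.foldl_nil]
    have hrowu := hrow u hun
    have h2e : 2 ^ (i+1) = 2 * 2 ^ i := by rw [pow_succ]; ring
    by_cases hb : u / 2 ^ i % 2 = 1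
    · -- black position: combine with the preceding block
      have hu1 : 1 ≤ u := by
        rcases Nat.eq_zero_or_pos u with h | h
        · subst h; simp at hb
        · exact h
      have ha1 : 1 ≤ u / 2 ^ i := by
        rcases Nat.eq_zero_or_pos (u / 2 ^ i) with h | h
        · rw [h] at hb; simp at hb
        · exact h
      have hsu : u / 2 ^ i * 2 ^ i ≤ u := Nat.div_mul_le_self u (2 ^ i)
      have hs1 : 2 ^ i ≤ u / 2 ^ i * 2 ^ i := Nat.le_mul_of_pos_left _ (by omega)
      have hmp : u % 2 ^ (i+1) = u % 2 ^ i + 2 ^ i * (u / 2 ^ i % 2) := Nat.mod_pow_succ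
      rw [hb, mul_one] at hmp
      have hcnt : (u - 1) / 2 ^ (i+1) = u / 2 ^ (i+1) := by
        rw [pred_div u _ hpos1 hu1, if_neg (by omega)]
      have hsplit : u / 2 ^ i * 2 ^ i = u / 2 ^ (i+1) * 2 ^ (i+1) + 2 ^ i := by
        rw [pow_succ_div,
            show u / 2 ^ i / 2 * 2 ^ (i + 1) = (u / 2 ^ i / 2 * 2) * 2 ^ i from by
              rw [pow_succ]; ring,
            odd_halve _ hb, sub_one_mul_nat]
        exact (Nat.sub_add_cancel hs1).symm
      have hidx : 2 ^ i - 1 + (u - 1) / 2 ^ (i+1) * 2 ^ (i+1) = u / 2 ^ i * 2 ^ i - 1 := by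
        rw [hcnt]
        exact helper1 _ _ _ hpos hsplit
      have hXpos : 1 ≤ u / 2 ^ i * 2 ^ i := le_trans hpos hs1
      have hsm1lt : u / 2 ^ i * 2 ^ i - 1 < u := by omega
      have hsm1n : u / 2 ^ i * 2 ^ i - 1 < G.length := by omega
      have hsdivi : (u / 2 ^ i * 2 ^ i - 1) / 2 ^ i = u / 2 ^ i - 1 := by
        rw [pred_div _ _ hpos hXpos, if_pos (Nat.mul_mod_left _ _), Nat.mul_div_cancel _ hpos]
      have hwhite : ¬ ((u / 2 ^ i * 2 ^ i - 1) / 2 ^ i % 2 = 1) := by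
        rw [hsdivi]; omega
      have hsm : u / 2 ^ i * 2 ^ i - 1 = (2 ^ i - 1) + 2 ^ (i+1) * (u / 2 ^ (i+1)) := by
        rw [mul_comm (2 ^ (i+1)) (u / 2 ^ (i+1))]
        exact helper2 _ _ _ hpos hsplit
      have hsdiv1 : (u / 2 ^ i * 2 ^ i - 1) / 2 ^ (i+1) = u / 2 ^ (i+1) := by
        rw [hsm, Nat.add_mul_div_left _ _ hpos1, Nat.div_eq_of_lt (by omega)]
        omega
      -- the four reads
      have hr1 : ((List.range G.length).map
          (fun j => if j < u then Vf G P (i+1) j else Vf G P i j)).getD u 0 = Vf G P i u := by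
        rw [PySem.List.getD_map_range _ _ _ _ hun, if_neg (lt_irrefl u)]
      have hr2 : ((List.range G.length).map
          (fun j => if j < u then Vf G P (i+1) j else Vf G P i j)).getD
            (u / 2 ^ i * 2 ^ i - 1) 0 = Vf G P i (u / 2 ^ i * 2 ^ i - 1) := by
        rw [PySem.List.getD_map_range _ _ _ _ hsm1n, if_pos hsm1lt,
            show Vf G P (i+1) (u / 2 ^ i * 2 ^ i - 1)
              = if (u / 2 ^ i * 2 ^ i - 1) / 2 ^ i % 2 = 1 then
                  pyOrI (Vf G P i (u / 2 ^ i * 2 ^ i - 1))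
                    (pyAndI (Vf G P i (((u / 2 ^ i * 2 ^ i - 1) / 2 ^ i) * 2 ^ i - 1))
                      (pv P (((u / 2 ^ i * 2 ^ i - 1) / 2 ^ i) * 2 ^ i) (u / 2 ^ i * 2 ^ i - 1)))
                else Vf G P i (u / 2 ^ i * 2 ^ i - 1) from rfl,
            if_neg hwhite]
      have hr3 : (((List.range G.length).map
          (fun j => if j < u then pv P (j / 2 ^ (i+1) * 2 ^ (i+1)) j
                    else pv P (j / 2 ^ i * 2 ^ i) j)) ++ P.drop G.length).getD u 0
          = pv P (u / 2 ^ i * 2 ^ i) u := by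
        rw [getD_mr_append _ _ _ _ hun, if_neg (lt_irrefl u)]
      have hr4 : (((List.range G.length).map
          (fun j => if j < u then pv P (j / 2 ^ (i+1) * 2 ^ (i+1)) j
                    else pv P (j / 2 ^ i * 2 ^ i) j)) ++ P.drop G.length).getD
            (u / 2 ^ i * 2 ^ i - 1) 0
          = pv P (u / 2 ^ i * 2 ^ i - 2 ^ i) (u / 2 ^ i * 2 ^ i - 1) := by
        rw [getD_mr_append _ _ _ _ hsm1n, if_pos hsm1lt, hsdiv1,
            helper3 _ _ _ hsplit]
      simp only [if_pos (by rw [hrowu, if_pos hb] : row.getD u 0 = 1)]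
      rw [hidx, hr1, hr2, hr3, hr4]
      refine Prod.ext ?_ (Prod.ext ?_ ?_)
      · show ((List.range G.length).map _).set u _ = _
        rw [set_map_range]
        apply List.map_congr_left
        intro m hm
        rcases Nat.lt_trichotomy m u with h | h | h
        · rw [if_neg (by omega), if_pos h, if_pos (by omega)]
        · subst h
          rw [if_pos rfl, if_pos (by omega),
              show Vf G P (i+1) m = if m / 2 ^ i % 2 = 1 then
                  pyOrI (Vf G P i m)
                    (pyAndI (Vf G P i ((m / 2 ^ i) * 2 ^ i - 1))
                      (pv P ((m / 2 ^ i) * 2 ^ i) m))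
                else Vf G P i m from rfl,
              if_pos hb]
        · rw [if_neg (by omega), if_neg (by omega), if_neg (by omega)]
      · show (((List.range G.length).map _) ++ _).set u _ = _
        rw [set_mr_append _ _ _ _ _ hun]
        congr 1
        apply List.map_congr_left
        intro m hm
        rcases Nat.lt_trichotomy m u with h | h | h
        · rw [if_neg (by omega), if_pos h, if_pos (by omega)]
        · subst h
          rw [if_pos rfl, if_pos (by omega),
              pv_merge P (m / 2 ^ i * 2 ^ i - 2 ^ i) (m / 2 ^ i * 2 ^ i) m
                (Nat.sub_le _ _) (by omega) hsu,
              helper3 _ _ _ hsplit]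
        · rw [if_neg (by omega), if_neg (by omega), if_neg (by omega)]
      · show (u - 1) / 2 ^ (i+1) = (u + 1 - 1) / 2 ^ (i+1)
        rw [hcnt, Nat.add_sub_cancel]
    · -- white position: no value update, possibly bump the counter
      have hwV : Vf G P (i+1) u = Vf G P i u := by
        rw [show Vf G P (i+1) u = if u / 2 ^ i % 2 = 1 then
              pyOrI (Vf G P i u)
                (pyAndI (Vf G P i ((u / 2 ^ i) * 2 ^ i - 1)) (pv P ((u / 2 ^ i) * 2 ^ i) u))
            else Vf G P i u from rfl, if_neg hb]
      have hwl : u / 2 ^ (i+1) * 2 ^ (i+1) = u / 2 ^ i * 2 ^ i := by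
        rw [show u / 2 ^ (i+1) * 2 ^ (i+1) = (u / 2 ^ i / 2 * 2) * 2 ^ i from by
              rw [pow_succ_div, pow_succ]; ring,
            even_halve _ hb]
      simp only [if_neg (by rw [hrowu, if_neg hb]; norm_num : ¬ (row.getD u 0 = 1))]
      have hmaps :
          ((List.range G.length).map
             (fun j => if j < u then Vf G P (i+1) j else Vf G P i j)
           = (List.range G.length).map
             (fun j => if j < u + 1 then Vf G P (i+1) j else Vf G P i j))
          ∧ ((List.range G.length).map
             (fun j => if j < u then pv P (j / 2 ^ (i+1) * 2 ^ (i+1)) j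
                       else pv P (j / 2 ^ i * 2 ^ i) j)
           = (List.range G.length).map
             (fun j => if j < u + 1 then pv P (j / 2 ^ (i+1) * 2 ^ (i+1)) j
                       else pv P (j / 2 ^ i * 2 ^ i) j)) := by
        constructor <;>
        · apply List.map_congr_left
          intro m hm
          rcases Nat.lt_trichotomy m u with h | h | h
          · rw [if_pos h, if_pos (by omega)]
          · subst h
            rw [if_neg (lt_irrefl m), if_pos (by omega)]
            first
              | exact hwV.symm
              | rw [hwl]
          · rw [if_neg (by omega), if_neg (by omega)]
      by_cases hu0 : u = 0
      · subst hu0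
        simp only [ne_eq, not_true_eq_false, false_and, if_false]
        rw [hmaps.1, hmaps.2]
      · have hprev : u - 1 < G.length := by omega
        have hrowp := hrow (u - 1) hprev
        by_cases hpb : (u - 1) / 2 ^ i % 2 = 1
        · -- previous black, u white: block boundary, counter increments
          have hmod0 : u % 2 ^ (i+1) = 0 := by
            have hmodi : u % 2 ^ i = 0 := by
              by_contra hc
              have hd : (u - 1) / 2 ^ i = u / 2 ^ i := by
                rw [pred_div _ _ hpos (by omega), if_neg hc]
              rw [hd] at hpb
              exact hb hpb
            have hmp : u % 2 ^ (i+1) = u % 2 ^ i + 2 ^ i * (u / 2 ^ i % 2) := Nat.mod_pow_succ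
            have hbit0 : u / 2 ^ i % 2 = 0 := by omega
            rw [hmodi, hbit0] at hmp
            simpa using hmp
          have hq1 : 1 ≤ u / 2 ^ (i+1) := by
            have hdm := Nat.div_add_mod u (2 ^ (i+1))
            rcases Nat.eq_zero_or_pos (u / 2 ^ (i+1)) with h | h
            · rw [h, Nat.mul_zero] at hdm; omega
            · exact h
          have hcnt : (u - 1) / 2 ^ (i+1) + 1 = u / 2 ^ (i+1) := by
            rw [pred_div u _ hpos1 (by omega), if_pos hmod0]
            omega
          simp only [if_pos (show (u ≠ 0 ∧ row.getD (u - 1) 0 = 1) from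
            ⟨by omega, by rw [hrowp, if_pos hpb]⟩)]
          rw [hmaps.1, hmaps.2, Nat.add_sub_cancel, hcnt]
        · -- previous white as well: inside a white block
          have hmodne : ¬ (u % 2 ^ (i+1) = 0) := by
            intro hc
            have hmodi : u % 2 ^ i = 0 := by
              have hmp : u % 2 ^ (i+1) = u % 2 ^ i + 2 ^ i * (u / 2 ^ i % 2) := Nat.mod_pow_succ
              omega
            have hd : (u - 1) / 2 ^ i = u / 2 ^ i - 1 := by
              rw [pred_div _ _ hpos (by omega), if_pos hmodi]
            have hq1 : 1 ≤ u / 2 ^ i := by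
              have hdm := Nat.div_add_mod u (2 ^ i)
              rcases Nat.eq_zero_or_pos (u / 2 ^ i) with h | h
              · rw [h, Nat.mul_zero] at hdm; omega
              · exact h
            apply hpb
            rw [hd]
            omega
          have hcnt : (u - 1) / 2 ^ (i+1) = u / 2 ^ (i+1) := by
            rw [pred_div u _ hpos1 (by omega), if_neg hmodne]
          simp only [if_neg (show ¬ (u ≠ 0 ∧ row.getD (u - 1) 0 = 1) from by
            rintro ⟨-, hc⟩
            rw [hrowp, if_neg hpb] at hc
            norm_num at hc)]
          rw [hmaps.1, hmaps.2, Nat.add_sub_cancel, hcnt]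

theorem list_eq_map_getD (L : List Int) :
    L = (List.range L.length).map (fun j => L.getD j 0) := by
  apply List.ext_getElem (by simp)
  intro m h1 h2
  simp [List.getElem_map, List.getElem_range, List.getD_eq_getElem?_getD,
        List.getElem?_eq_getElem h1]

theorem take_eq_map_getD (P : List Int) (n : Nat) (h : n ≤ P.length) :
    P.take n = (List.range n).map (fun j => P.getD j 0) := by
  apply List.ext_getElem (by simp [h])
  intro m h1 h2
  have hm : m < n := by simpa using h2
  simp [List.getElem_take, List.getElem_map, List.getElem_range,
        List.getD_eq_getElem?_getD, List.getElem?_eq_getElem (by omega : m < P.length)]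

theorem pv_self (P : List Int) (j : Nat) : pv P j j = P.getD j 0 := by
  rw [pv]
  simp

theorem outer_inv (G P : List Int) (hP : G.length ≤ P.length) (t : Nat)
    (ht : t ≤ Nat.clog 2 G.length) :
    (List.range t).foldl
      (fun (st : List Int × List Int) i =>
        let row := (create_ladner_fisher G.length).getD i []
        let inner :=
          (List.range G.length).foldl
            (fun (st2 : List Int × List Int × Nat) j =>
              let pg := st2.1
              let pp := st2.2.1
              let counter := st2.2.2
              if row.getD j 0 = 1 then
                let idx := 2 ^ i - 1 + counter * 2 ^ (i + 1)
                let newg := pyOrI (pg.getD j 0) (pyAndI (pg.getD idx 0) (pp.getD j 0))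
                let newp := pyAndI (pp.getD j 0) (pp.getD idx 0)
                (pg.set j newg, pp.set j newp, counter)
              else if j ≠ 0 ∧ row.getD (j - 1) 0 = 1 then (pg, pp, counter + 1)
              else (pg, pp, counter))
            (st.1, st.2, 0)
        (inner.1, inner.2.1))
      (G, P)
    = ((List.range G.length).map (fun j => Vf G P t j),
       (List.range G.length).map (fun j => pv P (j / 2 ^ t * 2 ^ t) j) ++ P.drop G.length) := by
  induction t with
  | zero =>
    simp only [List.range_zero, List.foldl_nil]
    refine Prod.ext ?_ ?_
    · show G = _
      rw [show (fun j => Vf G P 0 j) = (fun j => G.getD j 0) from rfl]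
      exact list_eq_map_getD G
    · show P = _
      conv_lhs => rw [← List.take_append_drop G.length P]
      congr 1
      rw [take_eq_map_getD P G.length hP]
      apply List.map_congr_left
      intro m hm
      rw [show m / 2 ^ 0 * 2 ^ 0 = m by simp, pv_self]
  | succ t ih =>
    rw [List.range_succ, List.foldl_append, ih (by omega), List.foldl_cons, List.foldl_nil]
    dsimp only
    have hrowc : (create_ladner_fisher G.length).getD t []
        = (List.range G.length).map
            (fun j => if j / 2 ^ t % 2 = 1 then (1:Int) else 0) := by
      rw [lf_char, PySem.List.getD_map_range _ _ _ _ (by omega : t < Nat.clog 2 G.length)]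
    rw [hrowc]
    have hrow : ∀ j, j < G.length →
        ((List.range G.length).map
          (fun j => if j / 2 ^ t % 2 = 1 then (1:Int) else 0)).getD j 0
        = (if j / 2 ^ t % 2 = 1 then (1:Int) else 0) := fun j hj =>
      PySem.List.getD_map_range _ _ _ _ hj
    rw [inner_inv G P t _ hrow G.length le_rfl]
    refine Prod.ext ?_ ?_
    · apply List.map_congr_left
      intro m hm
      rw [if_pos (by simpa using hm)]
    · show _ ++ _ = _ ++ _
      congr 1
      apply List.map_congr_left
      intro m hm
      rw [if_pos (by simpa using hm)]

theorem A_char (G P : List Int) (hP : G.length ≤ P.length) :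
    parallel_prefix G P =
      (List.range G.length).map (fun j => Vf G P (Nat.clog 2 G.length) j) := by
  have hF : (create_ladner_fisher G.length).length = Nat.clog 2 G.length := by
    rw [lf_char]; simp
  show ((List.range (create_ladner_fisher G.length).length).foldl _ (G, P)).1 = _
  rw [hF, outer_inv G P hP (Nat.clog 2 G.length) le_rfl]

-- ---- B side: the divide-and-conquer scan computes (W, pv) on each aligned block ----

theorem W_self (G P : List Int) (lo : Nat) : W G P lo lo = G.getD lo 0 := by
  by_cases hG : G.getD lo 0 ≠ 0
  · rw [W, if_pos hG]
  · rw [W, if_neg hG, Kf, if_neg hG, dif_pos le_rfl]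
    have h0 := not_not.mp hG
    show (0 : Int) = G.getD lo 0
    omega

theorem getD_set_pair (l : List (Int × Int)) (i j : Nat) (v : Int × Int) :
    (l.set i v).getD j (0, 0)
      = if i = j ∧ j < l.length then v else l.getD j (0, 0) := by
  rw [List.getD_eq_getElem?_getD, List.getD_eq_getElem?_getD, List.getElem?_set]
  split_ifs <;> simp_all

theorem growWidth_aux (n : Nat) : ∀ d w, n ≤ w + d → (∃ k, w = 2 ^ k) →
    ∃ e, growWidth n w = 2 ^ e ∧ n ≤ 2 ^ e := by
  intro d
  induction d with
  | zero =>
    intro w hd ⟨k, hk⟩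
    have hw0 : w ≠ 0 := by subst hk; exact (Nat.two_pow_pos k).ne'
    rw [growWidth, if_neg hw0, if_neg (by omega)]
    exact ⟨k, hk, by omega⟩
  | succ d ihd =>
    intro w hd ⟨k, hk⟩
    have hw1 : 1 ≤ w := hk ▸ Nat.one_le_two_pow
    by_cases hlt : w < n
    · rw [growWidth, if_neg (by omega), if_pos hlt]
      exact ihd (w + w) (by omega) ⟨k + 1, by rw [hk, pow_succ]; ring⟩
    · rw [growWidth, if_neg (by omega), if_neg hlt]
      exact ⟨k, hk, by omega⟩

theorem growWidth_pow (n : Nat) : ∃ e, growWidth n 1 = 2 ^ e ∧ n ≤ 2 ^ e :=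
  growWidth_aux n n 1 (by omega) ⟨0, rfl⟩

-- equation lemmas for bScanGo (zeta-reduced forms of its two branches)
theorem bScanGo_stop (n lo width : Nat) (out : List (Int × Int))
    (h : width ≤ 1 ∨ n ≤ lo) : bScanGo n lo width out = out := by
  rw [bScanGo, if_pos h]

theorem bScanGo_eq (n lo width : Nat) (out : List (Int × Int))
    (h : ¬ (width ≤ 1 ∨ n ≤ lo)) :
    bScanGo n lo width out =
      (if lo + width / 2 < n then
        (List.range' (lo + width / 2) (min (lo + width) n - (lo + width / 2))).foldl
          (fun acc j =>
            acc.set j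
              (pyOrI (acc.getD j (0, 0)).1
                 (pyAndI ((bScanGo n (lo + width / 2) (width / 2)
                     (bScanGo n lo (width / 2) out)).getD (lo + width / 2 - 1) (0, 0)).1
                   (acc.getD j (0, 0)).2),
               pyAndI (acc.getD j (0, 0)).2
                 ((bScanGo n (lo + width / 2) (width / 2)
                     (bScanGo n lo (width / 2) out)).getD (lo + width / 2 - 1) (0, 0)).2))
          (bScanGo n (lo + width / 2) (width / 2) (bScanGo n lo (width / 2) out))
      else bScanGo n (lo + width / 2) (width / 2) (bScanGo n lo (width / 2) out)) := by
  rw [bScanGo, if_neg h]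

-- fold of the combine over range' start len: pointwise image on [start, start+len)
theorem foldl_set_block (gv pv0 : Int) :
    ∀ (len start : Nat) (acc : List (Int × Int)),
    ((List.range' start len).foldl
        (fun acc j =>
          acc.set j
            (pyOrI (acc.getD j (0, 0)).1 (pyAndI gv (acc.getD j (0, 0)).2),
             pyAndI (acc.getD j (0, 0)).2 pv0)) acc).length = acc.length
    ∧ ∀ j, ((List.range' start len).foldl
        (fun acc j =>
          acc.set j
            (pyOrI (acc.getD j (0, 0)).1 (pyAndI gv (acc.getD j (0, 0)).2),
             pyAndI (acc.getD j (0, 0)).2 pv0)) acc).getD j (0, 0)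
        = if start ≤ j ∧ j < start + len ∧ j < acc.length
          then (pyOrI (acc.getD j (0, 0)).1 (pyAndI gv (acc.getD j (0, 0)).2),
                pyAndI (acc.getD j (0, 0)).2 pv0)
          else acc.getD j (0, 0) := by
  intro len
  induction len with
  | zero =>
    intro start acc
    refine ⟨by simp, fun j => ?_⟩
    rw [if_neg (by omega)]
    simp
  | succ len ihl =>
    intro len0 acc
    rw [List.range'_succ, List.foldl_cons]
    obtain ⟨ihlen, ihget⟩ := ihl (len0 + 1)
      (acc.set len0
        (pyOrI (acc.getD len0 (0, 0)).1 (pyAndI gv (acc.getD len0 (0, 0)).2),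
         pyAndI (acc.getD len0 (0, 0)).2 pv0))
    refine ⟨by rw [ihlen]; simp, fun j => ?_⟩
    rw [ihget j, List.length_set, getD_set_pair]
    rcases Nat.lt_trichotomy j len0 with hlt | heq | hgt
    · have hB : ¬ (len0 = j ∧ j < acc.length) := fun hc => by omega
      rw [if_neg (show ¬ (len0 + 1 ≤ j ∧ j < len0 + 1 + len ∧ j < acc.length) by omega),
          if_neg hB, if_neg (by omega)]
    · subst heq
      rw [if_neg (show ¬ (j + 1 ≤ j ∧ j < j + 1 + len ∧ j < acc.length) by omega)]
      by_cases hlen : j < acc.length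
      · rw [if_pos ⟨rfl, hlen⟩, if_pos (by omega)]
      · rw [if_neg (fun hc => hlen hc.2), if_neg (by omega)]
    · have hB : ¬ (len0 = j ∧ j < acc.length) := fun hc => by omega
      by_cases hA : len0 + 1 ≤ j ∧ j < len0 + 1 + len ∧ j < acc.length
      · rw [if_pos hA, if_neg hB, if_pos (by omega)]
      · rw [if_neg hA, if_neg hB, if_neg (by omega)]

theorem scan_spec (G P : List Int) : ∀ (e lo : Nat) (out : List (Int × Int)),
    lo % 2 ^ e = 0 →
    out.length = G.length →
    (∀ j, lo ≤ j → j < G.length → j < lo + 2 ^ e →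
        out.getD j (0, 0) = (G.getD j 0, P.getD j 0)) →
    (bScanGo G.length lo (2 ^ e) out).length = G.length
    ∧ (∀ j, lo ≤ j → j < G.length → j < lo + 2 ^ e →
        (bScanGo G.length lo (2 ^ e) out).getD j (0, 0) = (W G P lo j, pv P lo j))
    ∧ (∀ j, j < lo ∨ lo + 2 ^ e ≤ j →
        (bScanGo G.length lo (2 ^ e) out).getD j (0, 0) = out.getD j (0, 0)) := by
  intro e
  induction e with
  | zero =>
    intro lo out _ hlen hinit
    rw [bScanGo_stop _ _ _ _ (Or.inl (by norm_num))]
    refine ⟨hlen, fun j h1 h2 h3 => ?_, fun j _ => rfl⟩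
    have hj : j = lo := by omega
    subst hj
    rw [hinit j le_rfl h2 h3, W_self, pv_self]
  | succ e ih =>
    intro lo out halign hlen hinit
    have hpos : 0 < 2 ^ e := Nat.two_pow_pos e
    have h2e : 2 ^ (e + 1) = 2 ^ e + 2 ^ e := by rw [pow_succ]; omega
    have haligne : lo % 2 ^ e = 0 := by
      have hdvd : (2 : Nat) ^ e ∣ lo :=
        dvd_trans ⟨2, by rw [pow_succ]⟩ (Nat.dvd_of_mod_eq_zero halign)
      obtain ⟨c, hc⟩ := hdvd
      rw [hc, Nat.mul_mod_right]
    by_cases hlo : G.length ≤ lo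
    · rw [bScanGo_stop _ _ _ _ (Or.inr hlo)]
      exact ⟨hlen, fun j _ h2 _ => absurd h2 (by omega), fun j _ => rfl⟩
    · have hgate : ¬ (2 ^ (e + 1) ≤ 1 ∨ G.length ≤ lo) := by omega
      have hhalf : 2 ^ (e + 1) / 2 = 2 ^ e := by omega
      rw [bScanGo_eq _ _ _ _ hgate, hhalf]
      obtain ⟨ih1len, ih1val, ih1out⟩ :=
        ih lo out haligne hlen (fun j h1 h2 h3 => hinit j h1 h2 (by omega))
      obtain ⟨ih2len, ih2val, ih2out⟩ :=
        ih (lo + 2 ^ e) (bScanGo G.length lo (2 ^ e) out)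
          (by rw [Nat.add_mod_right]; exact haligne) ih1len
          (fun j h1 h2 h3 =>
            (ih1out j (Or.inr h1)).trans (hinit j (by omega) h2 (by omega)))
      set out2 := bScanGo G.length (lo + 2 ^ e) (2 ^ e) (bScanGo G.length lo (2 ^ e) out)
        with hout2
      by_cases hmid : lo + 2 ^ e < G.length
      · rw [if_pos hmid]
        have hm1a : lo ≤ lo + 2 ^ e - 1 := by omega
        have hm1b : lo + 2 ^ e - 1 < G.length := by omega
        have hm1c : lo + 2 ^ e - 1 < lo + 2 ^ e := by omega
        have hgl : out2.getD (lo + 2 ^ e - 1) (0, 0)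
            = (W G P lo (lo + 2 ^ e - 1), pv P lo (lo + 2 ^ e - 1)) := by
          rw [ih2out (lo + 2 ^ e - 1) (Or.inl hm1c), ih1val _ hm1a hm1b hm1c]
        obtain ⟨hflen, hfval⟩ := foldl_set_block
          (out2.getD (lo + 2 ^ e - 1) (0, 0)).1 (out2.getD (lo + 2 ^ e - 1) (0, 0)).2
          (min (lo + 2 ^ (e + 1)) G.length - (lo + 2 ^ e)) (lo + 2 ^ e) out2
        refine ⟨by rw [hflen, ih2len], fun j h1 h2 h3 => ?_, fun j hout => ?_⟩
        · rw [hfval j]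
          by_cases hseg : lo + 2 ^ e ≤ j
          · rw [if_pos ⟨hseg, by omega, by rw [ih2len]; omega⟩,
                ih2val j hseg h2 (by omega), hgl]
            obtain ⟨q, hq⟩ : (2 : Nat) ^ (e + 1) ∣ lo := Nat.dvd_of_mod_eq_zero halign
            have hlo2 : lo = 2 * q * 2 ^ e := by rw [hq, pow_succ]; ring
            have hjd : j / 2 ^ e = 2 * q + 1 := by
              have hexp : (2 * q + 1) * 2 ^ e = 2 * q * 2 ^ e + 2 ^ e := by ring
              have hj2 : j = (j - lo - 2 ^ e) + (2 * q + 1) * 2 ^ e := by omega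
              rw [hj2, Nat.add_mul_div_right _ _ hpos,
                  Nat.div_eq_of_lt (by omega)]
              omega
            have hseq : lo + 2 ^ e = j / 2 ^ e * 2 ^ e := by
              have hexp : (2 * q + 1) * 2 ^ e = 2 * q * 2 ^ e + 2 ^ e := by ring
              rw [hjd]
              omega
            have hbit : j / 2 ^ e % 2 = 1 := by rw [hjd]; omega
            have hWs := W_step G P e (lo + 2 ^ e) j (by omega) hseg hseq hbit
            rw [Nat.add_sub_cancel] at hWs
            have hpm := pv_merge P lo (lo + 2 ^ e) j (by omega) (by omega) hseg
            exact Prod.ext (by rw [← hWs]) (by rw [← hpm])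
          · rw [if_neg (by omega), ih2out j (Or.inl (by omega)),
                ih1val j h1 h2 (by omega)]
        · rw [hfval j, if_neg (by omega),
              ih2out j (by omega), ih1out j (by omega)]
      · rw [if_neg hmid]
        refine ⟨ih2len, fun j h1 h2 h3 => ?_, fun j hout => ?_⟩
        · rw [ih2out j (Or.inl (by omega)), ih1val j h1 h2 (by omega)]
        · rw [ih2out j (by omega), ih1out j (by omega)]

theorem getD_eq_getElem_pair (l : List (Int × Int)) (j : Nat) (h : j < l.length) :
    l.getD j (0, 0) = l[j] := by
  rw [List.getD_eq_getElem?_getD, List.getElem?_eq_getElem h]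
  rfl

theorem zip_getD (G P : List Int) (hP : G.length ≤ P.length) (j : Nat) (hj : j < G.length) :
    (G.zip P).getD j (0, 0) = (G.getD j 0, P.getD j 0) := by
  have hzl : j < (G.zip P).length := by rw [List.length_zip]; omega
  rw [getD_eq_getElem_pair _ _ hzl, List.getElem_zip,
      List.getD_eq_getElem?_getD, List.getElem?_eq_getElem hj,
      List.getD_eq_getElem?_getD, List.getElem?_eq_getElem (by omega : j < P.length)]
  rfl

theorem B_char (G P : List Int) (hP : G.length ≤ P.length) :
    parallel_prefix_alt G P = (List.range G.length).map (fun j => W G P 0 j) := by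
  obtain ⟨e, hw, hn⟩ := growWidth_pow G.length
  show ((bScanGo G.length 0 (growWidth G.length 1) (G.zip P)).map Prod.fst) = _
  rw [hw]
  have hzlen : (G.zip P).length = G.length := by rw [List.length_zip]; omega
  obtain ⟨hlen, hval, _⟩ := scan_spec G P e 0 (G.zip P) (by simp) hzlen
    (fun j _ hj _ => zip_getD G P hP j hj)
  apply List.ext_getElem (by simp [hlen])
  intro m h1 h2
  have hm : m < G.length := by
    have : (bScanGo G.length 0 (2 ^ e) (G.zip P)).length = G.length := hlen
    simpa [this] using h1
  rw [List.getElem_map, List.getElem_map, List.getElem_range,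
      ← getD_eq_getElem_pair _ m (by rw [hlen]; exact hm),
      hval m (Nat.zero_le m) hm (by omega)]

-- ===== VERDICT =====

theorem parallel_prefix_spec : Claim_equal_parallel_prefix := by
  unfold Claim_equal_parallel_prefix
  intro G P _ hPre
  unfold Pre_parallel_prefix at hPre
  unfold Spec_parallel_prefix
  obtain ⟨hne, hP⟩ := hPre
  rw [A_char G P hP, B_char G P hP]
  apply List.map_congr_left
  intro j hj
  have hjn : j < G.length := by simpa using hj
  have hjF : j < 2 ^ Nat.clog 2 G.length :=
    lt_of_lt_of_le hjn (Nat.le_pow_clog (by norm_num) _)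
  rw [V_char, Nat.div_eq_of_lt hjF, Nat.zero_mul]
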